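-- pv_equiv track=rewrite | github.com/LeoV974/Video-Idea | infection_video.py | find_next_to_fill
-- ===== SOURCE A (Python) =====
-- def get_neighbors(pos, grid_size):
--     r, c = pos
--     out = []
--     for dr, dc in [(-1, 0), (1, 0), (0, -1), (0, 1)]:
--         rr, cc = r + dr, c + dc
--         if 0 <= rr < grid_size and 0 <= cc < grid_size:
--             out.append((rr, cc))
--     return out
--
-- def find_next_to_fill(filled, grid_size):
--     to_fill = []
--     for r in range(grid_size):
--         for c in range(grid_size):
--             if (r, c) in filled:
--                 continue
--             count = 0
--             for nb in get_neighbors((r, c), grid_size):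
--                 if nb in filled:
--                     count += 1
--                 if count >= 2:
--                     to_fill.append((r, c))
--                     break
--     return to_fill
-- ===== SOURCE B (Python) =====
-- def _deltas(p):
--     r, c = p
--     return [(r - 1, c), (r + 1, c), (r, c - 1), (r, c + 1)]
--
-- def find_next_to_fill(filled, grid_size):
--     fs = {p for p in filled
--           if 0 <= p[0] < grid_size and 0 <= p[1] < grid_size}
--     candidates = set()
--     for p in fs:
--         for nb in _deltas(p):
--             if nb not in fs:
--                 candidates.add(nb)
--     result = []
--     for p in sorted(candidates):
--         r, c = p
--         if 0 <= r < grid_size and 0 <= c < grid_size: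
--             count = (((r - 1, c) in fs) + ((r + 1, c) in fs)
--                      + ((r, c - 1) in fs) + ((r, c + 1) in fs))
--             if count >= 2:
--                 result.append(p)
--     return result
-- ===== Notes on version B (the rewrite author's own statement) =====
-- stated objective: faster
-- what changed: Instead of scanning every grid cell and testing list membership for it and its neighbors, B builds a set of the in-grid filled cells, collects only the empty neighbors of filled cells as candidates, counts each candidate's filled neighbors with O(1) set lookups, and sorts the survivors row-major.
import Mathlib
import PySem

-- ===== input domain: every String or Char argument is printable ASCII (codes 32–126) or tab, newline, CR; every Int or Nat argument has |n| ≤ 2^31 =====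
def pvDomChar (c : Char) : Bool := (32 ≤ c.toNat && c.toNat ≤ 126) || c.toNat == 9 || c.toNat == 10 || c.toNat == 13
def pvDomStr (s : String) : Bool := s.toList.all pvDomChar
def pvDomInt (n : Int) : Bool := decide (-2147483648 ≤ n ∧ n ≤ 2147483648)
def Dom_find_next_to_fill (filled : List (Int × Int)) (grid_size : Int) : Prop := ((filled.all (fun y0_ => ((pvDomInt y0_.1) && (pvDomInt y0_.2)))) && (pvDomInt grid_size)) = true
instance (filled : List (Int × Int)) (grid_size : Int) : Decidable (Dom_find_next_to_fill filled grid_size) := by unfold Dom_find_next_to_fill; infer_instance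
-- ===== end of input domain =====

-- B replaces A's full-grid scan with list-membership tests by a set of in-grid filled cells,
-- candidate generation from filled cells' neighbors, O(1)-lookup counting and a row-major sort (faster).


-- ===== PORT A =====
def get_neighbors (pos : Int × Int) (grid_size : Int) : List (Int × Int) :=
  [((-1 : Int), (0 : Int)), (1, 0), (0, -1), (0, 1)].foldl
    (fun out d =>
      let rr := pos.1 + d.1
      let cc := pos.2 + d.2
      if 0 ≤ rr ∧ rr < grid_size ∧ 0 ≤ cc ∧ cc < grid_size then out ++ [(rr, cc)] else out) []

-- the inner 'for nb in get_neighbors(...)' loop with its count and break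
def fntf_inner (filled : List (Int × Int)) (cell : Int × Int)
    (acc : List (Int × Int)) : List (Int × Int) → Int → List (Int × Int)
  | [], _ => acc
  | nb :: rest, count =>
      let count' := if nb ∈ filled then count + 1 else count
      if 2 ≤ count' then acc ++ [cell] else fntf_inner filled cell acc rest count'

def find_next_to_fill (filled : List (Int × Int)) (grid_size : Int) : List (Int × Int) :=
  (PySem.List.pyRange 0 grid_size 1).foldl (fun acc r =>
    (PySem.List.pyRange 0 grid_size 1).foldl (fun acc c =>
      if (r, c) ∈ filled then acc
      else fntf_inner filled (r, c) acc (get_neighbors (r, c) grid_size) 0) acc) []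

-- ===== PORT B =====
def fntf_deltas (p : Int × Int) : List (Int × Int) :=
  [(p.1 - 1, p.2), (p.1 + 1, p.2), (p.1, p.2 - 1), (p.1, p.2 + 1)]

def fntf_inGrid (grid_size : Int) (p : Int × Int) : Bool :=
  decide (0 ≤ p.1 ∧ p.1 < grid_size ∧ 0 ≤ p.2 ∧ p.2 < grid_size)

def find_next_to_fill_alt (filled : List (Int × Int)) (grid_size : Int) : List (Int × Int) :=
  let fs : PySem.Set (Int × Int) := PySem.Set.ofList (filled.filter (fntf_inGrid grid_size))
  let cand : PySem.Set (Int × Int) :=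
    fs.foldl (fun s p =>
      (fntf_deltas p).foldl (fun s nb => if nb ∈ fs then s else PySem.Set.add s nb) s)
      PySem.Set.empty
  (PySem.List.sorted2 cand (fun p => p.1) (fun p => p.2)).foldl (fun res p =>
    if fntf_inGrid grid_size p then
      let count : Int :=
        (if (p.1 - 1, p.2) ∈ fs then 1 else 0) + (if (p.1 + 1, p.2) ∈ fs then 1 else 0)
          + (if (p.1, p.2 - 1) ∈ fs then 1 else 0) + (if (p.1, p.2 + 1) ∈ fs then 1 else 0)
      if 2 ≤ count then res ++ [p] else res
    else res) []

-- ===== PRECONDITION & SPEC =====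
def Spec_find_next_to_fill (filled : List (Int × Int)) (grid_size : Int) (out : List (Int × Int)) : Prop := out = find_next_to_fill_alt filled grid_size
instance (filled : List (Int × Int)) (grid_size : Int) (out : List (Int × Int)) : Decidable (Spec_find_next_to_fill filled grid_size out) := by unfold Spec_find_next_to_fill; infer_instance

-- ===== CLAIM (what is proved, stated in full; the proofs are below) =====
def Claim_equal_find_next_to_fill : Prop := ∀ (filled : List (Int × Int)) (grid_size : Int), Dom_find_next_to_fill filled grid_size → Spec_find_next_to_fill filled grid_size (find_next_to_fill filled grid_size)

-- ===== LEMMAS AND PROOFS =====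

-- strict row-major (lexicographic) order on cells
def fntf_slt (a b : Int × Int) : Prop := a.1 < b.1 ∨ (a.1 = b.1 ∧ a.2 < b.2)

-- abbreviations used by the proofs
def fntf_fs (filled : List (Int × Int)) (grid_size : Int) : List (Int × Int) :=
  PySem.Set.ofList (filled.filter (fntf_inGrid grid_size))

def fntf_nbCount (filled : List (Int × Int)) (grid_size : Int) (p : Int × Int) : Nat :=
  (get_neighbors p grid_size).countP (· ∈ filled)

theorem fntf_inner_eq (filled : List (Int × Int)) (cell : Int × Int)
    (acc : List (Int × Int)) (l : List (Int × Int)) : ∀ (count : Int), count < 2 →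
    fntf_inner filled cell acc l count =
      if 2 ≤ count + (l.countP (· ∈ filled) : Int) then acc ++ [cell] else acc := by
  induction l with
  | nil => intro count h; simp [fntf_inner]; omega
  | cons nb rest ih =>
    intro count h
    by_cases hm : nb ∈ filled
    · simp only [fntf_inner, List.countP_cons, hm, decide_true, if_true]
      by_cases h2 : 2 ≤ count + 1
      · rw [if_pos h2, if_pos (by push_cast; omega)]
      · rw [if_neg h2, ih _ (by omega)]
        have hiff : (2 ≤ count + 1 + (rest.countP (· ∈ filled) : Int)) ↔
            (2 ≤ count + ((rest.countP (· ∈ filled) + (if True then 1 else 0) : Nat) : Int)) := by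
          push_cast; omega
        rw [if_congr hiff rfl rfl]; norm_num
    · simp only [fntf_inner, List.countP_cons, hm, decide_false, if_false]
      rw [if_neg (by omega), ih _ h]
      have hiff : (2 ≤ count + (rest.countP (· ∈ filled) : Int)) ↔
          (2 ≤ count + ((rest.countP (· ∈ filled) + (if False then 1 else 0) : Nat) : Int)) := by
        push_cast; omega
      rw [if_congr hiff rfl rfl]; norm_num

-- A as one filtered row-major enumeration
theorem find_next_to_fill_eq (filled : List (Int × Int)) (grid_size : Int) :
    find_next_to_fill filled grid_size =
      (PySem.List.pyRange 0 grid_size 1).flatMap (fun r =>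
        ((PySem.List.pyRange 0 grid_size 1).filter (fun c =>
          !decide ((r, c) ∈ filled) && decide (2 ≤ fntf_nbCount filled grid_size (r, c)))).map
          (fun c => (r, c))) := by
  unfold find_next_to_fill
  have hinner : ∀ (r : Int) (acc : List (Int × Int)),
      (PySem.List.pyRange 0 grid_size 1).foldl (fun acc c =>
        if (r, c) ∈ filled then acc
        else fntf_inner filled (r, c) acc (get_neighbors (r, c) grid_size) 0) acc
      = acc ++ ((PySem.List.pyRange 0 grid_size 1).filter (fun c =>
          !decide ((r, c) ∈ filled) && decide (2 ≤ fntf_nbCount filled grid_size (r, c)))).map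
          (fun c => (r, c)) := by
    intro r acc
    have hbody : (fun (acc : List (Int × Int)) (c : Int) =>
        if (r, c) ∈ filled then acc
        else fntf_inner filled (r, c) acc (get_neighbors (r, c) grid_size) 0)
        = (fun acc c =>
            if (!decide ((r, c) ∈ filled) && decide (2 ≤ fntf_nbCount filled grid_size (r, c)))
            then acc ++ [(r, c)] else acc) := by
      funext acc c
      by_cases hm : (r, c) ∈ filled
      · simp [hm]
      · rw [if_neg hm, fntf_inner_eq filled (r, c) acc _ 0 (by omega)]
        simp only [hm, decide_false, Bool.not_false, Bool.true_and, zero_add]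
        by_cases h2 : 2 ≤ fntf_nbCount filled grid_size (r, c)
        · rw [if_pos (by unfold fntf_nbCount at h2; omega), if_pos (by simpa using h2)]
        · rw [if_neg (by unfold fntf_nbCount at h2; omega), if_neg (by simpa using h2)]
    rw [hbody, PySem.List.foldl_append_if]
  have houter : (fun (acc : List (Int × Int)) (r : Int) =>
      (PySem.List.pyRange 0 grid_size 1).foldl (fun acc c =>
        if (r, c) ∈ filled then acc
        else fntf_inner filled (r, c) acc (get_neighbors (r, c) grid_size) 0) acc)
      = (fun acc r => acc ++ ((PySem.List.pyRange 0 grid_size 1).filter (fun c =>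
          !decide ((r, c) ∈ filled) && decide (2 ≤ fntf_nbCount filled grid_size (r, c)))).map
          (fun c => (r, c))) := by
    funext acc r; exact hinner r acc
  rw [houter, PySem.List.foldl_append_eq_flatMap]
  simp

theorem mem_find_next_to_fill (filled : List (Int × Int)) (grid_size : Int) (x : Int × Int) :
    x ∈ find_next_to_fill filled grid_size ↔
      fntf_inGrid grid_size x = true ∧ x ∉ filled ∧ 2 ≤ fntf_nbCount filled grid_size x := by
  obtain ⟨r, c⟩ := x
  rw [find_next_to_fill_eq]
  simp only [List.mem_flatMap, List.mem_map, List.mem_filter, PySem.List.mem_pyRange_one,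
    fntf_inGrid, Bool.and_eq_true, Bool.not_eq_eq_eq_not, Bool.not_true, decide_eq_true_iff,
    decide_eq_false_iff_not]
  constructor
  · rintro ⟨r', hr', c', ⟨⟨hc', hnm, hcnt⟩, heq⟩⟩
    obtain ⟨h1, h2⟩ := Prod.mk.injEq .. ▸ heq
    subst h1; subst h2
    exact ⟨by omega, hnm, by simpa using hcnt⟩
  · rintro ⟨hg, hnm, hcnt⟩
    exact ⟨r, ⟨by omega, by omega⟩, c, ⟨⟨⟨by omega, by omega⟩, hnm, by simpa using hcnt⟩, rfl⟩⟩

theorem pairwise_find_next_to_fill (filled : List (Int × Int)) (grid_size : Int) :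
    (find_next_to_fill filled grid_size).Pairwise fntf_slt := by
  rw [find_next_to_fill_eq, List.pairwise_flatMap]
  constructor
  · intro r _
    rw [List.pairwise_map]
    refine List.Pairwise.imp ?_ (List.Pairwise.filter _ (PySem.List.pairwise_lt_pyRange_one 0 grid_size))
    intro c1 c2 h
    exact Or.inr ⟨rfl, h⟩
  · refine List.Pairwise.imp ?_ (PySem.List.pairwise_lt_pyRange_one 0 grid_size)
    intro r1 r2 h x hx y hy
    obtain ⟨c1, _, rfl⟩ := List.mem_map.mp hx
    obtain ⟨c2, _, rfl⟩ := List.mem_map.mp hy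
    exact Or.inl h

-- ---- B-side helpers ----
def fntf_before (a b : Int × Int) : Bool :=
  decide (a.1 < b.1) || (!decide (b.1 < a.1) && decide (a.2 < b.2))

def fntf_cand (filled : List (Int × Int)) (grid_size : Int) : List (Int × Int) :=
  (fntf_fs filled grid_size).foldl (fun s p =>
    (fntf_deltas p).foldl
      (fun s nb => if nb ∈ fntf_fs filled grid_size then s else PySem.Set.add s nb) s)
    PySem.Set.empty

def fntf_pb (filled : List (Int × Int)) (grid_size : Int) (p : Int × Int) : Bool :=
  fntf_inGrid grid_size p && decide (2 ≤
    ((if (p.1 - 1, p.2) ∈ fntf_fs filled grid_size then (1 : Int) else 0)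
      + (if (p.1 + 1, p.2) ∈ fntf_fs filled grid_size then 1 else 0)
      + (if (p.1, p.2 - 1) ∈ fntf_fs filled grid_size then 1 else 0)
      + (if (p.1, p.2 + 1) ∈ fntf_fs filled grid_size then 1 else 0)))

theorem fntf_mem_fs (filled : List (Int × Int)) (grid_size : Int) (y : Int × Int) :
    y ∈ fntf_fs filled grid_size ↔ y ∈ filled ∧ fntf_inGrid grid_size y = true := by
  unfold fntf_fs
  rw [PySem.Set.mem_ofList, List.mem_filter]

theorem fntf_slt_total (a b : Int × Int) (h : a ≠ b) : fntf_slt a b ∨ fntf_slt b a := by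
  obtain ⟨a1, a2⟩ := a; obtain ⟨b1, b2⟩ := b
  simp only [ne_eq, Prod.mk.injEq, not_and] at h
  unfold fntf_slt
  by_cases h1 : a1 = b1
  · rcases lt_or_gt_of_ne (h h1) with h2 | h2
    · exact Or.inl (Or.inr ⟨h1, h2⟩)
    · exact Or.inr (Or.inr ⟨h1.symm, h2⟩)
  · rcases lt_or_gt_of_ne h1 with h2 | h2
    · exact Or.inl (Or.inl h2)
    · exact Or.inr (Or.inl h2)

theorem fntf_slt_trans (a b c : Int × Int) (h1 : fntf_slt a b) (h2 : fntf_slt b c) :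
    fntf_slt a c := by
  unfold fntf_slt at *; omega

theorem fntf_slt_irrefl (a b : Int × Int) (h : fntf_slt a b) : a ≠ b := by
  intro he; subst he; unfold fntf_slt at h; omega

theorem fntf_before_iff (a b : Int × Int) : fntf_before a b = true ↔ fntf_slt a b := by
  unfold fntf_before fntf_slt
  simp only [Bool.or_eq_true, Bool.and_eq_true, Bool.not_eq_eq_eq_not, Bool.not_true,
    decide_eq_true_iff, decide_eq_false_iff_not]
  omega

theorem fntf_insertBy_spec (x : Int × Int) (acc : List (Int × Int))
    (hp : acc.Pairwise fntf_slt) (hx : x ∉ acc) :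
    (PySem.List.insertBy fntf_before x acc).Pairwise fntf_slt ∧
      (PySem.List.insertBy fntf_before x acc).Perm (x :: acc) := by
  induction acc with
  | nil => exact ⟨List.pairwise_singleton _ _, List.Perm.refl _⟩
  | cons y ys ih =>
    have hins : PySem.List.insertBy fntf_before x (y :: ys) =
        if fntf_before x y then x :: y :: ys else y :: PySem.List.insertBy fntf_before x ys := rfl
    rw [hins]
    by_cases hb : fntf_before x y = true
    · rw [if_pos hb]
      have hxy : fntf_slt x y := (fntf_before_iff x y).mp hb
      refine ⟨List.Pairwise.cons ?_ hp, List.Perm.refl _⟩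
      intro z hz
      rcases List.mem_cons.mp hz with rfl | hz
      · exact hxy
      · exact fntf_slt_trans _ _ _ hxy (List.rel_of_pairwise_cons hp hz)
    · rw [if_neg hb]
      have hxney : x ≠ y := fun he => hx (he ▸ List.mem_cons_self)
      have hyx : fntf_slt y x := by
        rcases fntf_slt_total x y hxney with h | h
        · exact absurd ((fntf_before_iff x y).mpr h) hb
        · exact h
      obtain ⟨hp', hperm'⟩ := ih hp.tail (fun h => hx (List.mem_cons_of_mem _ h))
      refine ⟨List.Pairwise.cons ?_ hp', ?_⟩
      · intro z hz
        rcases List.mem_cons.mp (hperm'.mem_iff.mp hz) with rfl | hz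
        · exact hyx
        · exact List.rel_of_pairwise_cons hp hz
      · exact ((hperm'.cons y).trans (List.Perm.swap x y ys)).symm.symm
  
theorem fntf_foldl_insertBy_pairwise : ∀ (xs acc : List (Int × Int)),
    acc.Pairwise fntf_slt → (acc ++ xs).Nodup →
    (xs.foldl (fun acc x => PySem.List.insertBy fntf_before x acc) acc).Pairwise fntf_slt := by
  intro xs
  induction xs with
  | nil => intro acc hp _; simpa using hp
  | cons x rest ih =>
    intro acc hp hnd
    have hx : x ∉ acc := fun hmem => List.disjoint_of_nodup_append hnd hmem List.mem_cons_self
    obtain ⟨hp', hperm'⟩ := fntf_insertBy_spec x acc hp hx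
    refine ih _ hp' ?_
    have h1 : (PySem.List.insertBy fntf_before x acc ++ rest).Perm (acc ++ x :: rest) :=
      (hperm'.append_right rest).trans List.perm_middle.symm
    exact h1.nodup_iff.mpr hnd

theorem fntf_sorted2_pairwise (xs : List (Int × Int)) (h : xs.Nodup) :
    (PySem.List.sorted2 xs (fun p => p.1) (fun p => p.2)).Pairwise fntf_slt := by
  have he : PySem.List.sorted2 xs (fun p => p.1) (fun p => p.2) =
      xs.foldl (fun acc x => PySem.List.insertBy fntf_before x acc) [] := rfl
  rw [he]
  exact fntf_foldl_insertBy_pairwise xs [] (List.Pairwise.nil) (by simpa using h)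

theorem fntf_mem_inner_fold (fs : List (Int × Int)) (y : Int × Int) :
    ∀ (l : List (Int × Int)) (s : List (Int × Int)),
    (y ∈ l.foldl (fun s nb => if nb ∈ fs then s else PySem.Set.add s nb) s ↔
      y ∈ s ∨ (y ∈ l ∧ y ∉ fs)) := by
  intro l
  induction l with
  | nil => intro s; simp
  | cons nb rest ih =>
    intro s
    simp only [List.foldl_cons]
    by_cases hm : nb ∈ fs
    · rw [if_pos hm, ih s]
      constructor
      · rintro (h | ⟨h1, h2⟩)
        · exact Or.inl h
        · exact Or.inr ⟨List.mem_cons_of_mem _ h1, h2⟩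
      · rintro (h | ⟨h1, h2⟩)
        · exact Or.inl h
        · rcases List.mem_cons.mp h1 with rfl | h1
          · exact absurd hm h2
          · exact Or.inr ⟨h1, h2⟩
    · rw [if_neg hm, ih _]
      rw [PySem.Set.mem_add]
      constructor
      · rintro ((h | rfl) | ⟨h1, h2⟩)
        · exact Or.inl h
        · exact Or.inr ⟨List.mem_cons_self, hm⟩
        · exact Or.inr ⟨List.mem_cons_of_mem _ h1, h2⟩
      · rintro (h | ⟨h1, h2⟩)
        · exact Or.inl (Or.inl h)
        · rcases List.mem_cons.mp h1 with rfl | h1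
          · exact Or.inl (Or.inr rfl)
          · exact Or.inr ⟨h1, h2⟩

theorem fntf_nodup_inner_fold (fs : List (Int × Int)) :
    ∀ (l : List (Int × Int)) (s : List (Int × Int)), s.Nodup →
    (l.foldl (fun s nb => if nb ∈ fs then s else PySem.Set.add s nb) s).Nodup := by
  intro l
  induction l with
  | nil => intro s h; simpa using h
  | cons nb rest ih =>
    intro s h
    simp only [List.foldl_cons]
    by_cases hm : nb ∈ fs
    · rw [if_pos hm]; exact ih s h
    · rw [if_neg hm]; exact ih _ (PySem.Set.nodup_add s nb h)

theorem fntf_mem_outer_fold (fs : List (Int × Int)) (y : Int × Int) :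
    ∀ (L : List (Int × Int)) (s : List (Int × Int)),
    (y ∈ L.foldl (fun s p => (fntf_deltas p).foldl
        (fun s nb => if nb ∈ fs then s else PySem.Set.add s nb) s) s ↔
      y ∈ s ∨ ∃ p ∈ L, y ∈ fntf_deltas p ∧ y ∉ fs) := by
  intro L
  induction L with
  | nil => intro s; simp
  | cons q rest ih =>
    intro s
    simp only [List.foldl_cons]
    rw [ih _, fntf_mem_inner_fold fs y _ s]
    constructor
    · rintro ((h | ⟨h1, h2⟩) | ⟨p, hp, h1, h2⟩)
      · exact Or.inl h
      · exact Or.inr ⟨q, List.mem_cons_self, h1, h2⟩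
      · exact Or.inr ⟨p, List.mem_cons_of_mem _ hp, h1, h2⟩
    · rintro (h | ⟨p, hp, h1, h2⟩)
      · exact Or.inl (Or.inl h)
      · rcases List.mem_cons.mp hp with rfl | hp
        · exact Or.inl (Or.inr ⟨h1, h2⟩)
        · exact Or.inr ⟨p, hp, h1, h2⟩

theorem fntf_nodup_outer_fold (fs : List (Int × Int)) :
    ∀ (L : List (Int × Int)) (s : List (Int × Int)), s.Nodup →
    (L.foldl (fun s p => (fntf_deltas p).foldl
        (fun s nb => if nb ∈ fs then s else PySem.Set.add s nb) s) s).Nodup := by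
  intro L
  induction L with
  | nil => intro s h; simpa using h
  | cons q rest ih =>
    intro s h
    simp only [List.foldl_cons]
    exact ih _ (fntf_nodup_inner_fold fs _ s h)

theorem fntf_mem_cand (filled : List (Int × Int)) (grid_size : Int) (y : Int × Int) :
    y ∈ fntf_cand filled grid_size ↔
      (∃ p ∈ fntf_fs filled grid_size, y ∈ fntf_deltas p) ∧ y ∉ fntf_fs filled grid_size := by
  unfold fntf_cand
  rw [fntf_mem_outer_fold]
  constructor
  · rintro (h | ⟨p, hp, h1, h2⟩)
    · simp [PySem.Set.empty] at h
    · exact ⟨⟨p, hp, h1⟩, h2⟩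
  · rintro ⟨⟨p, hp, h1⟩, h2⟩
    exact Or.inr ⟨p, hp, h1, h2⟩

theorem fntf_nodup_cand (filled : List (Int × Int)) (grid_size : Int) :
    (fntf_cand filled grid_size).Nodup := by
  unfold fntf_cand
  exact fntf_nodup_outer_fold _ _ _ (by simp [PySem.Set.empty])

theorem fntf_alt_eq (filled : List (Int × Int)) (grid_size : Int) :
    find_next_to_fill_alt filled grid_size =
      (PySem.List.sorted2 (fntf_cand filled grid_size) (fun p => p.1) (fun p => p.2)).filter
        (fntf_pb filled grid_size) := by
  have hdef : find_next_to_fill_alt filled grid_size =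
      (PySem.List.sorted2 (fntf_cand filled grid_size) (fun p => p.1) (fun p => p.2)).foldl
        (fun res p =>
          if fntf_inGrid grid_size p then
            let count : Int :=
              (if (p.1 - 1, p.2) ∈ fntf_fs filled grid_size then 1 else 0)
                + (if (p.1 + 1, p.2) ∈ fntf_fs filled grid_size then 1 else 0)
                + (if (p.1, p.2 - 1) ∈ fntf_fs filled grid_size then 1 else 0)
                + (if (p.1, p.2 + 1) ∈ fntf_fs filled grid_size then 1 else 0)
            if 2 ≤ count then res ++ [p] else res
          else res) [] := rfl
  rw [hdef]
  have hbody : (fun (res : List (Int × Int)) (p : Int × Int) =>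
      if fntf_inGrid grid_size p then
        let count : Int :=
          (if (p.1 - 1, p.2) ∈ fntf_fs filled grid_size then 1 else 0)
            + (if (p.1 + 1, p.2) ∈ fntf_fs filled grid_size then 1 else 0)
            + (if (p.1, p.2 - 1) ∈ fntf_fs filled grid_size then 1 else 0)
            + (if (p.1, p.2 + 1) ∈ fntf_fs filled grid_size then 1 else 0)
        if 2 ≤ count then res ++ [p] else res
      else res)
      = (fun res p => if fntf_pb filled grid_size p then res ++ [p] else res) := by
    funext res p
    unfold fntf_pb
    by_cases h1 : fntf_inGrid grid_size p
    · simp only [h1, if_true, Bool.true_and]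
      by_cases h2 : (2 : Int) ≤
          ((if (p.1 - 1, p.2) ∈ fntf_fs filled grid_size then 1 else 0)
            + (if (p.1 + 1, p.2) ∈ fntf_fs filled grid_size then 1 else 0)
            + (if (p.1, p.2 - 1) ∈ fntf_fs filled grid_size then 1 else 0)
            + (if (p.1, p.2 + 1) ∈ fntf_fs filled grid_size then 1 else 0))
      · simp [h2]
      · simp [h2]
    · simp [h1]
  rw [hbody, PySem.List.foldl_append_if_eq_filter]
  rfl

theorem fntf_gn_eq (p : Int × Int) (grid_size : Int) :
    get_neighbors p grid_size = (fntf_deltas p).filter (fntf_inGrid grid_size) := by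
  obtain ⟨r, c⟩ := p
  simp only [get_neighbors, fntf_deltas, fntf_inGrid, List.foldl_cons, List.foldl_nil,
    List.filter_cons, List.filter_nil]
  norm_num
  split_ifs <;> simp [sub_eq_add_neg]

theorem fntf_count_eq (filled : List (Int × Int)) (grid_size : Int) (p : Int × Int) :
    ((if (p.1 - 1, p.2) ∈ fntf_fs filled grid_size then (1 : Int) else 0)
      + (if (p.1 + 1, p.2) ∈ fntf_fs filled grid_size then 1 else 0)
      + (if (p.1, p.2 - 1) ∈ fntf_fs filled grid_size then 1 else 0)
      + (if (p.1, p.2 + 1) ∈ fntf_fs filled grid_size then 1 else 0))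
      = (fntf_nbCount filled grid_size p : Int) := by
  unfold fntf_nbCount
  rw [fntf_gn_eq, List.countP_filter]
  obtain ⟨r, c⟩ := p
  simp only [fntf_deltas, List.countP_cons, List.countP_nil]
  by_cases m1 : ((r - 1, c) : Int × Int) ∈ filled <;>
  by_cases m2 : ((r + 1, c) : Int × Int) ∈ filled <;>
  by_cases m3 : ((r, c - 1) : Int × Int) ∈ filled <;>
  by_cases m4 : ((r, c + 1) : Int × Int) ∈ filled <;>
  by_cases g1 : fntf_inGrid grid_size (r - 1, c) = true <;>
  by_cases g2 : fntf_inGrid grid_size (r + 1, c) = true <;>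
  by_cases g3 : fntf_inGrid grid_size (r, c - 1) = true <;>
  by_cases g4 : fntf_inGrid grid_size (r, c + 1) = true <;>
  simp [fntf_mem_fs, m1, m2, m3, m4, g1, g2, g3, g4]

theorem fntf_deltas_symm (a b : Int × Int) : a ∈ fntf_deltas b ↔ b ∈ fntf_deltas a := by
  obtain ⟨a1, a2⟩ := a; obtain ⟨b1, b2⟩ := b
  simp only [fntf_deltas, List.mem_cons, List.not_mem_nil, or_false, Prod.mk.injEq]
  omega

theorem fntf_mem_alt (filled : List (Int × Int)) (grid_size : Int) (x : Int × Int) :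
    x ∈ find_next_to_fill_alt filled grid_size ↔
      x ∈ fntf_cand filled grid_size ∧ fntf_pb filled grid_size x = true := by
  rw [fntf_alt_eq, List.mem_filter,
    (PySem.List.sorted2_perm (fntf_cand filled grid_size) _ _ false).mem_iff]

theorem fntf_mem_iff_mem (filled : List (Int × Int)) (grid_size : Int) (x : Int × Int) :
    x ∈ find_next_to_fill filled grid_size ↔ x ∈ find_next_to_fill_alt filled grid_size := by
  rw [mem_find_next_to_fill, fntf_mem_alt]
  unfold fntf_pb
  constructor
  · rintro ⟨hg, hnm, hcnt⟩
    have hxfs : x ∉ fntf_fs filled grid_size := by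
      rw [fntf_mem_fs]; rintro ⟨h, _⟩; exact hnm h
    have hcnt' : 2 ≤ ((if (x.1 - 1, x.2) ∈ fntf_fs filled grid_size then (1 : Int) else 0)
        + (if (x.1 + 1, x.2) ∈ fntf_fs filled grid_size then 1 else 0)
        + (if (x.1, x.2 - 1) ∈ fntf_fs filled grid_size then 1 else 0)
        + (if (x.1, x.2 + 1) ∈ fntf_fs filled grid_size then 1 else 0)) := by
      rw [fntf_count_eq]; exact_mod_cast hcnt
    refine ⟨?_, by rw [hg, Bool.true_and, decide_eq_true_iff]; exact hcnt'⟩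
    rw [fntf_mem_cand]
    refine ⟨?_, hxfs⟩
    have hpos : 0 < (get_neighbors x grid_size).countP (· ∈ filled) := by
      unfold fntf_nbCount at hcnt; omega
    obtain ⟨nb, hnb, hnbf⟩ := List.countP_pos_iff.mp hpos
    rw [fntf_gn_eq, List.mem_filter] at hnb
    refine ⟨nb, ?_, (fntf_deltas_symm x nb).mpr hnb.1⟩
    rw [fntf_mem_fs]
    exact ⟨by simpa using hnbf, hnb.2⟩
  · rintro ⟨hc, hpb⟩
    rw [Bool.and_eq_true, decide_eq_true_iff] at hpb
    obtain ⟨hg, hcnt⟩ := hpb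
    have hxfs : x ∉ fntf_fs filled grid_size := ((fntf_mem_cand _ _ _).mp hc).2
    have hnm : x ∉ filled := by
      intro h
      exact hxfs ((fntf_mem_fs _ _ _).mpr ⟨h, hg⟩)
    rw [fntf_count_eq] at hcnt
    exact ⟨hg, hnm, by exact_mod_cast hcnt⟩

theorem fntf_nodup_of_pairwise (l : List (Int × Int)) (h : l.Pairwise fntf_slt) : l.Nodup :=
  h.imp (fun hab => fntf_slt_irrefl _ _ hab)

theorem find_next_to_fill_spec' (filled : List (Int × Int)) (grid_size : Int) :
    find_next_to_fill filled grid_size = find_next_to_fill_alt filled grid_size := by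
  have hApw := pairwise_find_next_to_fill filled grid_size
  have hBpw : (find_next_to_fill_alt filled grid_size).Pairwise fntf_slt := by
    rw [fntf_alt_eq]
    exact List.Pairwise.filter _ (fntf_sorted2_pairwise _ (fntf_nodup_cand filled grid_size))
  have hperm : (find_next_to_fill filled grid_size).Perm (find_next_to_fill_alt filled grid_size) := by
    rw [List.perm_ext_iff_of_nodup (fntf_nodup_of_pairwise _ hApw) (fntf_nodup_of_pairwise _ hBpw)]
    exact fun a => fntf_mem_iff_mem filled grid_size a
  exact List.Perm.eq_of_pairwise
    (fun a b _ _ h1 h2 => absurd rfl (fntf_slt_irrefl a a (fntf_slt_trans _ _ _ h1 h2)))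
    hApw hBpw hperm

-- ===== VERDICT (by name: the statement is the Claim_ definition above) =====
theorem find_next_to_fill_spec : Claim_equal_find_next_to_fill := by
  intro filled grid_size _
  unfold Spec_find_next_to_fill
  exact find_next_to_fill_spec' filled grid_size
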